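-- pv_equiv track=rewrite | github.com/agucova/cs42 | rúbricas/i1/ciegos.py | ciegos
-- ===== SOURCE A (Python) =====
-- def ciegos(m, k):
--     assert isinstance(k, int)
--
--     tramos = []
--     tramo = 0
--     for char in m:
--         if char != "V":
--             tramo += 1
--         else:
--             tramos.append(tramo)
--             tramo = 0
--     suma = 0
--     for t in tramos:
--         if t >= k:
--             dif = t - k
--             suma += dif + 1
--
--     return suma
-- ===== SOURCE B (Python) =====
-- def ciegos(m, k):
--     assert isinstance(k, int)
--     segs = m.split("V")
--     return sum(len(s) - k + 1 for s in segs[:-1] if len(s) >= k)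
-- ===== Notes on version B (the rewrite author's own statement) =====
-- stated objective: simpler
-- what changed: Replaces A's two-pass character state machine (hand-maintained segment-length list, then a second summing loop) with a single library segmentation m.split('V') and one guarded comprehension over all but the last piece (faster by the constant factor of C-level str.split vs a per-character Python loop).
import Mathlib
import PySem

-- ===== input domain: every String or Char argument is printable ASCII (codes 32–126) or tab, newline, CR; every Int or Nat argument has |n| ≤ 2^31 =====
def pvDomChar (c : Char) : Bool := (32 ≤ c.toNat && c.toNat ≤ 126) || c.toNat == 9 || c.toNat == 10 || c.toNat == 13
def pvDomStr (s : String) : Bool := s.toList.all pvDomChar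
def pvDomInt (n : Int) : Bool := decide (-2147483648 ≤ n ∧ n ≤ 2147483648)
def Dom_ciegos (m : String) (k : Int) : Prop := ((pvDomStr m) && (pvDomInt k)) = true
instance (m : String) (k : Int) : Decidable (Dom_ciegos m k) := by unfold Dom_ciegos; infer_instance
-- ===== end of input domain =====

-- B: same sum of window placements, via m.split('V') and a guarded comprehension
-- over all but the last piece, instead of A's two-pass character state machine.

-- ===== PORT A =====
def ciegosStep (st : List Int × Int) (c : Char) : List Int × Int :=
  if c ≠ 'V' then (st.1, st.2 + 1) else (st.1 ++ [st.2], 0)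

def ciegos (m : String) (k : Int) : Int :=
  let st := m.toList.foldl ciegosStep ([], 0)
  st.1.foldl (fun suma t => if t ≥ k then let dif := t - k; suma + (dif + 1) else suma) 0

-- ===== PORT B =====
-- m.split('V') with a one-character separator is List.splitOn 'V' on the characters.
def ciegos_alt (m : String) (k : Int) : Int :=
  let segs := m.toList.splitOn 'V'
  ((segs.dropLast.filter (fun s => decide ((s.length : Int) ≥ k))).map
    (fun s => (s.length : Int) - k + 1)).sum

-- ===== PRECONDITION & SPEC =====
def Spec_ciegos (m : String) (k : Int) (out : Int) : Prop := out = ciegos_alt m k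
instance (m : String) (k : Int) (out : Int) : Decidable (Spec_ciegos m k out) := by unfold Spec_ciegos; infer_instance

-- ===== CLAIM (what is proved, stated in full; the proofs are below) =====
def Claim_equal_ciegos : Prop := ∀ (m : String) (k : Int), Dom_ciegos m k → Spec_ciegos m k (ciegos m k)

-- ===== LEMMAS AND PROOFS =====
-- tramosOf n cs: the (tramos, tramo) state A's first loop reaches from (ts, n), head-recursively.
def tramosOf (n : Int) : List Char → List Int × Int
  | [] => ([], n)
  | c :: cs =>
    if c = 'V' then
      let r := tramosOf 0 cs
      (n :: r.1, r.2)
    else tramosOf (n + 1) cs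

lemma modifyHead_add_zero (l : List Int) : l.modifyHead (fun x => 0 + x) = l := by
  cases l <;> simp

lemma foldl_ciegosStep (cs : List Char) : ∀ (ts : List Int) (n : Int),
    cs.foldl ciegosStep (ts, n) = (ts ++ (tramosOf n cs).1, (tramosOf n cs).2) := by
  induction cs with
  | nil => intro ts n; simp [tramosOf]
  | cons c cs ih =>
    intro ts n
    by_cases h : c = 'V'
    · subst h
      simp [List.foldl_cons, ciegosStep, tramosOf, ih]
    · simp [List.foldl_cons, ciegosStep, h, tramosOf, ih]

lemma tramosOf_eq_splitOn (cs : List Char) : ∀ (n : Int),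
    (tramosOf n cs).1 =
      (((cs.splitOn 'V').dropLast).map (fun s => (s.length : Int))).modifyHead (fun x => n + x) := by
  induction cs with
  | nil => intro n; rfl
  | cons c cs ih =>
    intro n
    have hne : cs.splitOnP (· == 'V') ≠ [] := List.splitOnP_ne_nil _ cs
    by_cases h : c = 'V'
    · subst h
      rw [List.splitOn, List.splitOnP_cons]
      simp only [beq_self_eq_true]
      rcases hL : cs.splitOnP (· == 'V') with _ | ⟨s, rest⟩
      · exact absurd hL hne
      · simp [tramosOf, ih 0, List.splitOn, hL]
    · rw [List.splitOn, List.splitOnP_cons]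
      have hb : (c == 'V') = false := by simp [h]
      simp only [hb, Bool.false_eq_true, if_false]
      rcases hL : cs.splitOnP (· == 'V') with _ | ⟨s, rest⟩
      · exact absurd hL hne
      · rcases rest with _ | ⟨r, rs⟩
        · simp [tramosOf, h, ih (n + 1), List.splitOn, hL]
        · have := ih (n + 1)
          rw [List.splitOn, hL] at this
          simp only [tramosOf, h, if_false, this]
          simp [List.modifyHead]
          ring

lemma foldl_sum_filter (k : Int) (ts : List Int) : ∀ (acc : Int),
    ts.foldl (fun suma t => if t ≥ k then let dif := t - k; suma + (dif + 1) else suma) acc =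
      acc + ((ts.filter (fun t => decide (t ≥ k))).map (fun t => t - k + 1)).sum := by
  induction ts with
  | nil => intro acc; simp
  | cons t ts ih =>
    intro acc
    by_cases h : t ≥ k
    · simp only [List.foldl_cons, if_pos h, List.filter_cons, decide_eq_true h, ih]
      simp; ring
    · simp only [List.foldl_cons, if_neg h, List.filter_cons, decide_eq_false h, ih]
      simp

-- ===== VERDICT (by name: the statement is the Claim_ definition above) =====
theorem ciegos_spec : Claim_equal_ciegos := by
  intro m k _
  unfold Spec_ciegos ciegos ciegos_alt
  rw [foldl_ciegosStep, foldl_sum_filter, tramosOf_eq_splitOn, modifyHead_add_zero]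
  simp only [List.nil_append, zero_add]
  rw [List.filter_map, List.map_map]
  rfl
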